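-- pv_equiv track=rewrite | github.com/animus-dolum/lessons | 6 pyqt 3 exceptions/1 classwork/4.py | check
-- ===== SOURCE A (Python) =====
-- def check(s):
--     b = [
--         "qwe",
--         "wer",
--         "ert",
--         "rty",
--         "tyu",
--         "yui",
--         "uio",
--         "iop",
--         "asd",
--         "sdf",
--         "dfg",
--         "fgh",
--         "ghj",
--         "hjk",
--         "jkl",
--         "zxc",
--         "xcv",
--         "cvb",
--         "vbn",
--         "bnm",
--         "йцу",
--         "цук",
--         "уке",
--         "кен",
--         "енг",
--         "нгш",
--         "гшщ",
--         "шщз",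
--         "щзх",
--         "зхъ",
--         "фыв",
--         "ыва",
--         "вап",
--         "апр",
--         "про",
--         "рол",
--         "олд",
--         "лдж",
--         "джэ",
--         "ячс",
--         "чсм",
--         "сми",
--         "мит",
--         "ить",
--         "тьб",
--         "ьбю",
--         "жэё",
--     ]
--     if (
--         len(s) > 8
--         and s.lower != s
--         and s.upper() != s
--         and "1" in [str(int(x.isdigit())) for x in s]
--         and "1"
--         not in "".join(
--             list(
--                 map(
--                     lambda x: "".join(x).replace("0", ""),
--                     [
--                         [
--                             str(int(s[i:i + 3].lower() in b[j]))
--                             for i in range(len(s) - 2)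
--                         ]
--                         for j in range(len(b))
--                     ],
--                 )
--             )
--         )
--     ):
--         return "ok"
--     else:
--         return "error"
-- ===== SOURCE B (Python) =====
-- _SEQS = frozenset([
--     "qwe", "wer", "ert", "rty", "tyu", "yui", "uio", "iop",
--     "asd", "sdf", "dfg", "fgh", "ghj", "hjk", "jkl",
--     "zxc", "xcv", "cvb", "vbn", "bnm",
--     "йцу", "цук", "уке", "кен", "енг", "нгш", "гшщ", "шщз", "щзх", "зхъ",
--     "фыв", "ыва", "вап", "апр", "про", "рол", "олд", "лдж", "джэ",
--     "ячс", "чсм", "сми", "мит", "ить", "тьб", "ьбю", "жэё",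
-- ])
--
--
-- def check(s):
--     # one pass: length, digit flag, lowercase-able flag, and a sliding
--     # window of the last two lowered characters for the sequence test
--     n = 0
--     has_digit = False
--     has_lowerable = False
--     bad = False
--     p2 = p1 = None
--     for c in s:
--         cl = c.lower()
--         if p2 is not None and p2 + p1 + cl in _SEQS:
--             bad = True
--         if c.isdigit():
--             has_digit = True
--         if c.upper() != c:
--             has_lowerable = True
--         n += 1
--         p2, p1 = p1, cl
--     return "ok" if n > 8 and has_lowerable and has_digit and not bad else "error"
-- ===== Notes on version B (the rewrite author's own statement) =====
-- stated objective: alternative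
-- what changed: Replaced A's 47x(n-2) indicator-matrix build (per-row '0'/'1' strings joined, replace('0',''), then a substring test for '1') and its staged whole-string checks with a single state-machine pass over the characters that accumulates the length, a digit flag, a lowercase-able flag, and a two-character sliding window tested against a frozenset of the forbidden sequences; the always-true bound-method comparison 's.lower != s' is dropped.
import Mathlib
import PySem

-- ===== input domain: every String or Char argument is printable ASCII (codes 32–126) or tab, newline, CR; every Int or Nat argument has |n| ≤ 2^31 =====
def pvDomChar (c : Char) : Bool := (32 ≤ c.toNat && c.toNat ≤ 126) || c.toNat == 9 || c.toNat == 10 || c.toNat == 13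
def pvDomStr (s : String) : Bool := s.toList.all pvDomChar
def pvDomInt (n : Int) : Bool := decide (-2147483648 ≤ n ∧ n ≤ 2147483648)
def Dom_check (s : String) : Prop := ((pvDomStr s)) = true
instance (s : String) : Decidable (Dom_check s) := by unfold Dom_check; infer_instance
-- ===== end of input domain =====

-- B replaces A's 47×(n−2) indicator-matrix build/join/replace and staged whole-string
-- checks with one state-machine pass (length, digit flag, lowercase-able flag, and a
-- two-char sliding window tested against a set), dropping the always-true bound-method
-- comparison 's.lower != s' (objective: alternative).

-- ===== PORT A =====
-- the keyboard-sequence list 'b' of A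
def pvKb : List String :=
  ["qwe", "wer", "ert", "rty", "tyu", "yui", "uio", "iop",
   "asd", "sdf", "dfg", "fgh", "ghj", "hjk", "jkl",
   "zxc", "xcv", "cvb", "vbn", "bnm",
   "йцу", "цук", "уке", "кен", "енг", "нгш", "гшщ", "шщз", "щзх", "зхъ",
   "фыв", "ыва", "вап", "апр", "про", "рол", "олд", "лдж", "джэ",
   "ячс", "чсм", "сми", "мит", "ить", "тьб", "ьбю", "жэё"]

def check (s : String) : String :=
  if (decide (8 < PySem.Str.len s)
      -- 's.lower != s' compares the bound method 'lower' with a string: always True in Python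
      && true
      && (PySem.Str.upper s != s)
      -- '"1" in [str(int(x.isdigit())) for x in s]'  (str(int(b)) is "1"/"0")
      && (s.toList.map (fun x => if PySem.Chars.isdigit x then "1" else "0")).contains "1"
      -- '"1" not in "".join(list(map(lambda x: "".join(x).replace("0",""), [[str(int(s[i:i+3].lower() in b[j])) for i in range(len(s)-2)] for j in range(len(b))])))'
      && !(PySem.Str.isIn "1" (PySem.Str.join ""
            ((PySem.List.pyRange 0 ((pvKb.length : Int)) 1).map (fun j =>
              PySem.Str.replace
                (PySem.Str.join ""
                  ((PySem.List.pyRange 0 (PySem.Str.len s - 2) 1).map (fun i =>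
                    if PySem.Str.isIn (PySem.Str.lower (PySem.Str.slice s (some i) (some (i + 3))))
                        (PySem.List.pyGetD pvKb j "") then "1" else "0")))
                "0" "")))))
  then "ok" else "error"

-- ===== PORT B =====
-- the frozenset _SEQS of B
def pvSeqs : PySem.Set String := PySem.Set.ofList
  ["qwe", "wer", "ert", "rty", "tyu", "yui", "uio", "iop",
   "asd", "sdf", "dfg", "fgh", "ghj", "hjk", "jkl",
   "zxc", "xcv", "cvb", "vbn", "bnm",
   "йцу", "цук", "уке", "кен", "енг", "нгш", "гшщ", "шщз", "щзх", "зхъ",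
   "фыв", "ыва", "вап", "апр", "про", "рол", "олд", "лдж", "джэ",
   "ячс", "чсм", "сми", "мит", "ить", "тьб", "ьбю", "жэё"]

-- 'p2 is not None and p2 + p1 + cl in _SEQS'
def pvWinHit : Option Char → Option Char → Char → Bool
  | some a, some b, c => PySem.Set.contains pvSeqs (String.ofList [a, b, c])
  | _, _, _ => false

-- the for-loop of B: state (n, has_digit, has_lowerable, bad) and pending chars p2 p1
def pvScan : List Char → Int → Bool → Bool → Bool → Option Char → Option Char →
    Int × Bool × Bool × Bool
  | [], n, hd, hl, bad, _, _ => (n, hd, hl, bad)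
  | c :: rest, n, hd, hl, bad, p2, p1 =>
    pvScan rest (n + 1) (hd || PySem.Chars.isdigit c) (hl || (PySem.Chars.upperChar c != c))
      (bad || pvWinHit p2 p1 (PySem.Chars.lowerChar c)) p1 (some (PySem.Chars.lowerChar c))

def check_alt (s : String) : String :=
  let r := pvScan s.toList 0 false false false none none
  if decide (8 < r.1) && r.2.2.1 && r.2.1 && !r.2.2.2 then "ok" else "error"

-- ===== PRECONDITION & SPEC =====
def Spec_check (s : String) (out : String) : Prop := out = check_alt s
instance (s : String) (out : String) : Decidable (Spec_check s out) := by unfold Spec_check; infer_instance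

-- ===== CLAIM (what is proved, stated in full; the proofs are below) =====
def Claim_equal_check : Prop := ∀ (s : String), Dom_check s → Spec_check s (check s)

-- ===== LEMMAS AND PROOFS =====

set_option maxRecDepth 100000
set_option maxHeartbeats 2000000

-- sliding-triple test used to characterise the bad-flag of B's scan
def pvTriplesBad : List Char → Bool
  | a :: b :: c :: t => PySem.Set.contains pvSeqs (String.ofList [a, b, c]) || pvTriplesBad (b :: c :: t)
  | _ => false

-- 'str.replace(s, "0", "")' filters out the '0' characters
lemma replace_go_filter (fuel : Nat) (l acc : List Char) (h : l.length ≤ fuel) :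
    PySem.Chars.replace.go ['0'] [] fuel l acc = acc.reverse ++ l.filter (· ≠ '0') := by
  induction fuel generalizing l acc with
  | zero =>
    cases l with
    | nil => simp [PySem.Chars.replace.go]
    | cons c t => simp at h
  | succ fuel ih =>
    cases l with
    | nil => simp [PySem.Chars.replace.go]
    | cons c t =>
      simp at h
      by_cases hc : c = '0'
      · subst hc
        rw [show PySem.Chars.replace.go ['0'] [] (fuel+1) ('0'::t) acc
              = PySem.Chars.replace.go ['0'] [] fuel t acc from by
            simp [PySem.Chars.replace.go, List.isPrefixOf]]
        rw [ih t acc (by omega)]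
        simp
      · rw [show PySem.Chars.replace.go ['0'] [] (fuel+1) (c::t) acc
              = PySem.Chars.replace.go ['0'] [] fuel t (c :: acc) from by
            simp [PySem.Chars.replace.go, List.isPrefixOf,
                  (by simpa using Ne.symm hc : ('0' == c) = false)]]
        rw [ih t (c :: acc) (by omega)]
        simp [hc]

lemma replace_zero (cs : List Char) :
    PySem.Chars.replace cs ['0'] [] = cs.filter (· ≠ '0') := by
  simpa using replace_go_filter cs.length cs [] le_rfl

lemma join_nil_flatten (parts : List (List Char)) :
    PySem.Chars.join [] parts = parts.flatten := by
  unfold PySem.Chars.join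
  induction parts with
  | nil => rfl
  | cons p ps ih =>
    cases ps with
    | nil => simp [List.intercalate]
    | cons q qs =>
      simp only [List.intercalate, List.intersperse] at ih ⊢
      simp [ih]

-- the digit clause: membership of "1" in the indicator list IS 'any isdigit'
lemma digit_clause (cs : List Char) :
    (cs.map (fun x => if PySem.Chars.isdigit x then "1" else "0")).contains "1"
      = cs.any PySem.Chars.isdigit := by
  induction cs with
  | nil => rfl
  | cons c t ih =>
    by_cases h : PySem.Chars.isdigit c
    · simp [h]
    · simp only [List.map_cons, List.any_cons, h, Bool.false_or]
      rw [← ih]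
      simp

-- map f l = l iff f fixes every element
lemma map_fix_iff {α : Type} (f : α → α) (l : List α) :
    l.map f = l ↔ ∀ c ∈ l, f c = c := by
  induction l with
  | nil => simp
  | cons a t ih => simp [ih]

-- 's.upper() != s' is 'some character changes under upper'
lemma upper_clause (s : String) :
    (PySem.Str.upper s != s) = s.toList.any (fun c => PySem.Chars.upperChar c != c) := by
  by_cases h : s.toList.map PySem.Chars.upperChar = s.toList
  · have hs : PySem.Str.upper s = s := by
      apply String.toList_injective
      rw [PySem.Str.toList_upper, PySem.Chars.upper, h]
    rw [hs]
    have : s.toList.any (fun c => PySem.Chars.upperChar c != c) = false := by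
      rw [List.any_eq_false]
      intro c hc
      simpa using (map_fix_iff _ _).mp h c hc
    simp [this]
  · have hs : PySem.Str.upper s ≠ s := by
      intro he
      apply h
      have := congrArg String.toList he
      rwa [PySem.Str.toList_upper, PySem.Chars.upper] at this
    have : s.toList.any (fun c => PySem.Chars.upperChar c != c) = true := by
      rw [List.any_eq_true]
      by_contra hnone
      push_neg at hnone
      apply h
      apply (map_fix_iff _ _).mpr
      intro c hc
      have := hnone c hc
      simpa using this
    simp [hs, this]

-- 'w in t' for strings of equal length 3 is equality
lemma isIn_eq_beq_of_len (w t : String) (hw : w.toList.length = 3) (ht : t.toList.length = 3) :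
    PySem.Str.isIn w t = (w == t) := by
  by_cases h : w = t
  · subst h
    rw [show (w == w) = true from by simp, PySem.Str.isIn_iff_infix]
  · rw [show (w == t) = false from by simpa using h]
    have hfalse : ¬ (PySem.Str.isIn w t = true) := by
      rw [PySem.Str.isIn_iff_infix]
      intro hinf
      exact h (String.toList_injective (List.IsInfix.eq_of_length hinf (by omega)))
    simpa using hfalse

-- every keyboard sequence has 3 characters
lemma pvKb_len3 : ∀ t ∈ pvKb, t.toList.length = 3 := by decide

-- a 3-char window is a substring of some keyboard sequence iff it is in the set
lemma seq_mem (w : String) (hw : w.toList.length = 3) :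
    (∃ j ∈ PySem.List.pyRange 0 ((pvKb.length : Int)) 1,
        PySem.Str.isIn w (PySem.List.pyGetD pvKb j "") = true)
      ↔ PySem.Set.contains pvSeqs w = true := by
  have hcont : PySem.Set.contains pvSeqs w = true ↔ w ∈ pvKb := by
    unfold PySem.Set.contains pvSeqs
    rw [List.contains_iff_mem, PySem.Set.mem_ofList]
    exact Iff.rfl
  rw [hcont]
  constructor
  · rintro ⟨j, hj, hin⟩
    rw [PySem.List.mem_pyRange_one] at hj
    have hlt : j.toNat < pvKb.length := by omega
    rw [PySem.List.pyGetD_of_nonneg pvKb "" hj.1, List.getD_eq_getElem _ _ hlt] at hin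
    have hmem : pvKb[j.toNat] ∈ pvKb := List.getElem_mem hlt
    rw [isIn_eq_beq_of_len w _ hw (pvKb_len3 _ hmem)] at hin
    exact (beq_iff_eq.mp hin) ▸ hmem
  · intro hmem
    obtain ⟨k, hk, hkw⟩ := List.mem_iff_getElem.mp hmem
    refine ⟨(k : Int), ?_, ?_⟩
    · rw [PySem.List.mem_pyRange_one]
      exact ⟨Int.natCast_nonneg k, by exact_mod_cast hk⟩
    · rw [PySem.List.pyGetD_of_nonneg pvKb "" (Int.natCast_nonneg k)]
      simp only [Int.toNat_natCast]
      rw [List.getD_eq_getElem _ _ hk, isIn_eq_beq_of_len w _ hw (pvKb_len3 _ (List.getElem_mem hk))]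
      exact beq_iff_eq.mpr hkw.symm

-- the window s[i:i+3].lower() has exactly 3 characters for i in range(len(s)-2)
lemma window_len (s : String) (i : Int) (h0 : 0 ≤ i) (h3 : i + 3 ≤ (s.toList.length : Int)) :
    (PySem.Str.lower (PySem.Str.slice s (some i) (some (i + 3)))).toList.length = 3 := by
  rw [PySem.Str.toList_lower, PySem.Chars.lower, List.length_map, PySem.Str.toList_slice,
      PySem.Chars.slice_eq_listSlice, PySem.List.slice_toNat s.toList h0 (show (0:Int) ≤ i + 3 by omega)]
  simp only [List.length_take, List.length_drop]
  omega

-- the keyboard clause of A equals an indexed windowed set scan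
lemma kb_clause (s : String) :
    PySem.Str.isIn "1" (PySem.Str.join ""
      ((PySem.List.pyRange 0 ((pvKb.length : Int)) 1).map (fun j =>
        PySem.Str.replace
          (PySem.Str.join ""
            ((PySem.List.pyRange 0 (PySem.Str.len s - 2) 1).map (fun i =>
              if PySem.Str.isIn (PySem.Str.lower (PySem.Str.slice s (some i) (some (i + 3))))
                  (PySem.List.pyGetD pvKb j "") then "1" else "0")))
          "0" "")))
    = ((PySem.List.pyRange 0 (PySem.Str.len s - 2) 1).any (fun i =>
        PySem.Set.contains pvSeqs (PySem.Str.lower (PySem.Str.slice s (some i) (some (i + 3)))))) := by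
  rw [Bool.eq_iff_iff, List.any_eq_true]
  rw [PySem.Str.isIn_eq, PySem.Chars.isIn_iff_infix,
      show ("1" : String).toList = ['1'] from rfl, List.singleton_infix_iff]
  rw [PySem.Str.toList_join, show ("" : String).toList = [] from rfl, List.map_map,
      join_nil_flatten]
  simp only [List.mem_flatten, List.mem_map, Function.comp_apply]
  constructor
  · rintro ⟨l, ⟨j, hj, rfl⟩, hone⟩
    rw [PySem.Str.toList_replace, show ("0" : String).toList = ['0'] from rfl,
        show ("" : String).toList = [] from rfl, replace_zero, List.mem_filter] at hone
    obtain ⟨hone, -⟩ := hone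
    rw [PySem.Str.toList_join, show ("" : String).toList = [] from rfl, List.map_map,
        join_nil_flatten] at hone
    simp only [List.mem_flatten, List.mem_map, Function.comp_apply] at hone
    obtain ⟨cell, ⟨i, hi, rfl⟩, hcell⟩ := hone
    refine ⟨i, hi, ?_⟩
    rw [PySem.List.mem_pyRange_one] at hi
    by_cases hc : PySem.Str.isIn (PySem.Str.lower (PySem.Str.slice s (some i) (some (i + 3))))
        (PySem.List.pyGetD pvKb j "") = true
    · have hwin := window_len s i hi.1 (by rw [PySem.Str.len_eq] at hi; omega)
      exact (seq_mem _ hwin).mp ⟨j, hj, hc⟩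
    · rw [if_neg hc] at hcell
      simp at hcell
  · rintro ⟨i, hi, hset⟩
    have hi' := PySem.List.mem_pyRange_one.mp hi
    have hwin := window_len s i hi'.1 (by rw [PySem.Str.len_eq] at hi'; omega)
    obtain ⟨j, hj, hin⟩ := (seq_mem _ hwin).mpr hset
    refine ⟨_, ⟨j, hj, rfl⟩, ?_⟩
    rw [PySem.Str.toList_replace, show ("0" : String).toList = ['0'] from rfl,
        show ("" : String).toList = [] from rfl, replace_zero, List.mem_filter]
    refine ⟨?_, by decide⟩
    rw [PySem.Str.toList_join, show ("" : String).toList = [] from rfl, List.map_map,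
        join_nil_flatten]
    simp only [List.mem_flatten, List.mem_map, Function.comp_apply]
    exact ⟨_, ⟨i, hi, rfl⟩, by rw [if_pos hin]; decide⟩

-- pvTriplesBad detects exactly the 3-char infixes that are in the set
lemma triplesBad_iff (l : List Char) :
    pvTriplesBad l = true ↔
      ∃ w : List Char, w.length = 3 ∧ w <:+: l ∧ PySem.Set.contains pvSeqs (String.ofList w) = true := by
  induction l using pvTriplesBad.induct with
  | case1 a b c t ih =>
    rw [pvTriplesBad, Bool.or_eq_true, ih]
    constructor
    · rintro (h | ⟨w, hw3, hwinf, hwset⟩)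
      · exact ⟨[a, b, c], rfl, ⟨[], t, rfl⟩, h⟩
      · exact ⟨w, hw3, hwinf.trans (List.suffix_cons a _).isInfix, hwset⟩
    · rintro ⟨w, hw3, hwinf, hwset⟩
      rcases hwinf with ⟨u, v, huv⟩
      match w, hw3 with
      | [w1, w2, w3], _ =>
        cases u with
        | nil =>
          left
          have h1 : w1 = a ∧ w2 = b ∧ w3 = c ∧ v = t := by
            simpa using huv
          obtain ⟨rfl, rfl, rfl, -⟩ := h1
          exact hwset
        | cons u1 ut =>
          right
          refine ⟨[w1, w2, w3], rfl, ⟨ut, v, ?_⟩, hwset⟩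
          have h1 : u1 = a ∧ ut ++ [w1, w2, w3] ++ v = b :: c :: t := by
            constructor
            · simpa using congrArg (fun l => l.headI) huv
            · have := congrArg List.tail huv
              simpa using this
          exact h1.2
  | case2 l h1 =>
    constructor
    · intro h
      exfalso
      cases l with
      | nil => simp [pvTriplesBad] at h
      | cons a t =>
        cases t with
        | nil => simp [pvTriplesBad] at h
        | cons b t2 =>
          cases t2 with
          | nil => simp [pvTriplesBad] at h
          | cons c t3 => exact h1 a b c t3 rfl
    · rintro ⟨w, hw3, hwinf, -⟩
      exfalso
      have hlen := hwinf.length_le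
      cases l with
      | nil => simp only [List.length_nil] at hlen; omega
      | cons a t =>
        cases t with
        | nil => simp only [List.length_cons, List.length_nil] at hlen; omega
        | cons b t2 =>
          cases t2 with
          | nil => simp at hlen; omega
          | cons c t3 => exact h1 a b c t3 rfl

-- the indexed windowed scan equals the triple test on the lowered character list
lemma range_any_eq_triplesBad (s : String) :
    ((PySem.List.pyRange 0 (PySem.Str.len s - 2) 1).any (fun i =>
        PySem.Set.contains pvSeqs (PySem.Str.lower (PySem.Str.slice s (some i) (some (i + 3))))))
      = pvTriplesBad (s.toList.map PySem.Chars.lowerChar) := by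
  rw [Bool.eq_iff_iff, List.any_eq_true, triplesBad_iff]
  constructor
  · rintro ⟨i, hi, hset⟩
    have hi' := PySem.List.mem_pyRange_one.mp hi
    rw [PySem.Str.len_eq] at hi'
    have hwlist : (PySem.Str.lower (PySem.Str.slice s (some i) (some (i + 3)))).toList
        = ((s.toList.map PySem.Chars.lowerChar).drop i.toNat).take 3 := by
      rw [PySem.Str.toList_lower, PySem.Chars.lower, PySem.Str.toList_slice,
          PySem.Chars.slice_eq_listSlice,
          PySem.List.slice_toNat s.toList hi'.1 (show (0:Int) ≤ i + 3 by omega),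
          List.map_take, List.map_drop]
      congr 1
      omega
    refine ⟨((s.toList.map PySem.Chars.lowerChar).drop i.toNat).take 3, ?_, ?_, ?_⟩
    · simp only [List.length_take, List.length_drop, List.length_map]
      omega
    · exact (List.take_prefix _ _).isInfix.trans (List.drop_suffix _ _).isInfix
    · have : PySem.Str.lower (PySem.Str.slice s (some i) (some (i + 3)))
          = String.ofList (((s.toList.map PySem.Chars.lowerChar).drop i.toNat).take 3) := by
        apply String.toList_injective
        simpa using hwlist
      rwa [this] at hset
  · rintro ⟨w, hw3, hwinf, hwset⟩
    rcases hwinf with ⟨u, v, huv⟩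
    refine ⟨(u.length : Int), ?_, ?_⟩
    · rw [PySem.List.mem_pyRange_one, PySem.Str.len_eq]
      have := congrArg List.length huv
      simp only [List.length_append, List.length_map] at this
      constructor
      · exact Int.natCast_nonneg _
      · omega
    · have hwlist : (PySem.Str.lower (PySem.Str.slice s (some (u.length : Int))
          (some ((u.length : Int) + 3)))).toList = w := by
        rw [PySem.Str.toList_lower, PySem.Chars.lower, PySem.Str.toList_slice,
            PySem.Chars.slice_eq_listSlice]
        rw [show ((u.length : Int) + 3) = ((u.length + 3 : Nat) : Int) by push_cast; ring]
        rw [PySem.List.slice_natCast, List.map_take, List.map_drop]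
        have hdrop : (s.toList.map PySem.Chars.lowerChar).drop u.length = w ++ v := by
          rw [← huv, List.append_assoc, List.drop_left]
        rw [hdrop, show u.length + 3 - u.length = 3 by omega, ← hw3, List.take_left]
      have : PySem.Str.lower (PySem.Str.slice s (some (u.length : Int))
          (some ((u.length : Int) + 3))) = String.ofList w := by
        apply String.toList_injective
        simpa using hwlist
      rw [this]
      exact hwset

-- closed form of B's scan once two characters are pending
lemma pvScan_inv (l : List Char) (n : Int) (hd hl bad : Bool) (a b : Char) :
    pvScan l n hd hl bad (some a) (some b)
      = (n + l.length, hd || l.any PySem.Chars.isdigit,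
         hl || l.any (fun c => PySem.Chars.upperChar c != c),
         bad || pvTriplesBad (a :: b :: l.map PySem.Chars.lowerChar)) := by
  induction l generalizing n hd hl bad a b with
  | nil => simp [pvScan, pvTriplesBad]
  | cons c t ih =>
    rw [pvScan, ih]
    refine Prod.ext ?_ (Prod.ext ?_ (Prod.ext ?_ ?_)) <;> simp [pvWinHit, pvTriplesBad,
      Bool.or_assoc]
    omega

-- closed form of B's scan from the initial state
lemma pvScan_start (l : List Char) :
    pvScan l 0 false false false none none
      = ((l.length : Int), l.any PySem.Chars.isdigit,
         l.any (fun c => PySem.Chars.upperChar c != c),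
         pvTriplesBad (l.map PySem.Chars.lowerChar)) := by
  cases l with
  | nil => simp [pvScan, pvTriplesBad]
  | cons c t =>
    cases t with
    | nil => simp [pvScan, pvWinHit, pvTriplesBad]
    | cons d t2 =>
      rw [pvScan, pvScan, pvScan_inv]
      refine Prod.ext ?_ (Prod.ext ?_ (Prod.ext ?_ ?_)) <;>
        simp [pvWinHit, pvTriplesBad, Bool.or_assoc]
      omega

-- ===== VERDICT (by name: the statement is the Claim_ definition above) =====
theorem check_spec : Claim_equal_check := by
  intro s _
  unfold Spec_check check check_alt
  rw [pvScan_start]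
  simp only []
  rw [digit_clause, upper_clause, kb_clause, range_any_eq_triplesBad, PySem.Str.len_eq]
  simp
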